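-- pv_equiv track=rewrite | github.com/ghu999/mit6.1010 | sat/lab.py | rule3
-- ===== SOURCE A (Python) =====
-- def rule3(name_list, n, location):
--     if n == 0:
--         return [[]]
--     if n > len(name_list):
--         return []
--     result = []
--     for i in range(len(name_list)):
--         for combo in rule3(name_list[i+1:], n-1, location):
--             result.append([(name_list[i]+"_"+str(location), False)] + combo)
--     return result
-- ===== SOURCE B (Python) =====
-- def rule3(name_list, n, location):
--     # Separate concerns: generate index-increasing combinations by take/skip-head
--     # structural recursion, then label each chosen name in one mapping pass.
--     if n < 0:
--         return []
--
--     def combs(k, xs):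
--         if k == 0:
--             return [[]]
--         if not xs:
--             return []
--         head, rest = xs[0], xs[1:]
--         return [[head] + c for c in combs(k - 1, rest)] + combs(k, rest)
--
--     return [[(name + "_" + str(location), False) for name in c]
--             for c in combs(n, name_list)]
-- ===== Notes on version B (the rewrite author's own statement) =====
-- stated objective: alternative
-- what changed: A recurses on n with an index loop over slices and builds the labelled tuples inside the recursion; B generates the combinations by a take/skip-head binary structural recursion on the list (no index loop, no slicing by position) and applies the location labelling in a single separate mapping pass.
import Mathlib
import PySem

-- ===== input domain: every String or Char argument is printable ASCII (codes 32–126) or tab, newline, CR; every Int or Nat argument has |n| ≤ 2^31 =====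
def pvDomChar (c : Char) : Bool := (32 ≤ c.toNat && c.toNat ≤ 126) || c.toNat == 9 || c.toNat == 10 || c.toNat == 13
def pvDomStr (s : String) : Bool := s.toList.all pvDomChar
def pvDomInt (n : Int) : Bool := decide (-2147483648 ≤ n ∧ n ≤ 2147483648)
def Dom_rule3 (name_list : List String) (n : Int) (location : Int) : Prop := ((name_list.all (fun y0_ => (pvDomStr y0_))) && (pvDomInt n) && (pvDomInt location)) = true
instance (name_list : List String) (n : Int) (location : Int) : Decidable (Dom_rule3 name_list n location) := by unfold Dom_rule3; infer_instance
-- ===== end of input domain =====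

-- B replaces A's n-recursion with index loop over slices by a take/skip-head structural
-- recursion generating the combinations, labelling them in a separate mapping pass (alternative decomposition).


-- ===== PORT A =====
-- literal transliteration of A: recursion on n, loop over i with slice name_list[i+1:]
def rule3 (name_list : List String) (n : Int) (location : Int) : List (List (String × Bool)) :=
  if n = 0 then [[]]
  else if n > (name_list.length : Int) then []
  else
    (List.range name_list.length).attach.foldl
      (fun result i =>
        result ++
          (rule3 (PySem.List.slice name_list (some ((i.1 : Int) + 1)) none) (n - 1) location).map
            (fun combo =>
              (PySem.List.pyGetD name_list (i.1 : Int) "" ++ "_" ++ PySem.Int.toStr location, false) :: combo))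
      []
termination_by name_list.length
decreasing_by
  have hi := List.mem_range.mp i.2
  have : ((i.1 : Int) + 1) = ((i.1 + 1 : Nat) : Int) := by push_cast; ring
  rw [this, PySem.List.slice_from_natCast, List.length_drop]
  omega

-- ===== PORT B =====
-- combinations of size k, by take-head / skip-head structural recursion (index-increasing order)
def combsAux (k : Nat) (xs : List String) : List (List String) :=
  match k, xs with
  | 0, _ => [[]]
  | _ + 1, [] => []
  | k + 1, x :: rest => ((combsAux k rest).map (fun c => x :: c)) ++ combsAux (k + 1) rest

def rule3_alt (name_list : List String) (n : Int) (location : Int) : List (List (String × Bool)) :=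
  if n < 0 then []
  else
    (combsAux n.toNat name_list).map
      (fun c => c.map (fun name => (name ++ "_" ++ PySem.Int.toStr location, false)))

-- ===== PRECONDITION & SPEC =====
def Spec_rule3 (name_list : List String) (n : Int) (location : Int) (out : List (List (String × Bool))) : Prop := out = rule3_alt name_list n location
instance (name_list : List String) (n : Int) (location : Int) (out : List (List (String × Bool))) : Decidable (Spec_rule3 name_list n location out) := by unfold Spec_rule3; infer_instance

-- ===== CLAIM (what is proved, stated in full; the proofs are below) =====
def Claim_equal_rule3 : Prop := ∀ (name_list : List String) (n : Int) (location : Int), Dom_rule3 name_list n location → Spec_rule3 name_list n location (rule3 name_list n location)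

-- ===== LEMMAS AND PROOFS =====

theorem foldl_append_flatMap {α β : Type} (l : List α) (g : α → List β) (acc : List β) :
    l.foldl (fun r i => r ++ g i) acc = acc ++ l.flatMap g := by
  induction l generalizing acc with
  | nil => simp
  | cons x xs ih => simp [ih, List.append_assoc]

theorem rule3_zero (xs : List String) (loc : Int) : rule3 xs 0 loc = [[]] := by
  rw [rule3]; simp

theorem rule3_gt (xs : List String) (n loc : Int) (h : (xs.length : Int) < n) :
    rule3 xs n loc = [] := by
  rw [rule3]
  have h0 : n ≠ 0 := by omega
  rw [if_neg h0, if_pos (by omega)]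

theorem rule3_unfold (xs : List String) (n loc : Int) (h0 : n ≠ 0) (hle : n ≤ (xs.length : Int)) :
    rule3 xs n loc =
      (List.range xs.length).flatMap
        (fun i => (rule3 (xs.drop (i + 1)) (n - 1) loc).map
          (fun combo => (xs.getD i "" ++ "_" ++ PySem.Int.toStr loc, false) :: combo)) := by
  rw [rule3, if_neg h0, if_neg (by omega)]
  rw [List.foldl_attach (f := fun (result : List (List (String × Bool))) (i : Nat) =>
        result ++ (rule3 (PySem.List.slice xs (some ((i : Int) + 1)) none) (n - 1) loc).map
          (fun combo => (PySem.List.pyGetD xs (i : Int) "" ++ "_" ++ PySem.Int.toStr loc, false) :: combo))]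
  rw [foldl_append_flatMap, List.nil_append]
  apply List.flatMap_congr
  intro i _
  have h1 : ((i : Int) + 1) = ((i + 1 : Nat) : Int) := by push_cast; ring
  rw [h1, PySem.List.slice_from_natCast, PySem.List.pyGetD_natCast]

theorem rule3_neg : ∀ (m : Nat) (xs : List String) (n loc : Int),
    xs.length ≤ m → n < 0 → rule3 xs n loc = [] := by
  intro m
  induction m with
  | zero =>
    intro xs n loc hm hn
    rw [rule3_unfold xs n loc (by omega) (by omega)]
    have : xs.length = 0 := by omega
    simp [this]
  | succ m ih =>
    intro xs n loc hm hn
    rw [rule3_unfold xs n loc (by omega) (by omega)]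
    apply List.flatMap_eq_nil_iff.mpr
    intro i hi
    rw [ih (xs.drop (i + 1)) (n - 1) loc (by simp at hi ⊢; omega) (by omega)]
    simp

theorem rule3_succ (x : String) (rest : List String) (k : Nat) (loc : Int) :
    rule3 (x :: rest) ((k : Int) + 1) loc =
      ((rule3 rest (k : Int) loc).map
        (fun c => (x ++ "_" ++ PySem.Int.toStr loc, false) :: c)) ++
      rule3 rest ((k : Int) + 1) loc := by
  by_cases hbig : (rest.length : Int) < (k : Int)
  · rw [rule3_gt _ _ _ (by simp; omega), rule3_gt rest _ _ hbig,
      rule3_gt rest _ _ (by omega)]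
    simp
  · -- k ≤ rest.length
    rw [rule3_unfold (x :: rest) ((k : Int) + 1) loc (by omega) (by simp; omega)]
    rw [show (x :: rest).length = rest.length + 1 from rfl, List.range_succ_eq_map]
    rw [List.flatMap_cons, List.flatMap_map]
    have htail : ∀ (j : Nat), j ∈ List.range rest.length →
        ((rule3 ((x :: rest).drop (Nat.succ j + 1)) ((k : Int) + 1 - 1) loc).map
          (fun combo => ((x :: rest).getD (Nat.succ j) "" ++ "_" ++ PySem.Int.toStr loc, false) :: combo))
        = ((rule3 (rest.drop (j + 1)) ((k : Int) + 1 - 1) loc).map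
          (fun combo => (rest.getD j "" ++ "_" ++ PySem.Int.toStr loc, false) :: combo)) := by
      intro j _
      rfl
    rw [List.flatMap_congr htail]
    have hhead : (rule3 ((x :: rest).drop (0 + 1)) ((k : Int) + 1 - 1) loc).map
          (fun combo => ((x :: rest).getD 0 "" ++ "_" ++ PySem.Int.toStr loc, false) :: combo)
        = (rule3 rest (k : Int) loc).map
          (fun c => (x ++ "_" ++ PySem.Int.toStr loc, false) :: c) := by
      simp
    rw [hhead]
    congr 1
    -- tail flatMap = rule3 rest (k+1)
    by_cases hk : (k : Int) + 1 ≤ (rest.length : Int)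
    · rw [rule3_unfold rest ((k : Int) + 1) loc (by omega) hk]
    · -- k = rest.length: both sides empty
      rw [rule3_gt rest ((k : Int) + 1) loc (by omega)]
      apply List.flatMap_eq_nil_iff.mpr
      intro j hj
      rw [rule3_gt]
      · simp
      · simp at hj ⊢; omega

theorem rule3_eq_combs (xs : List String) (k : Nat) (loc : Int) :
    rule3 xs (k : Int) loc =
      (combsAux k xs).map (fun c => c.map (fun name => (name ++ "_" ++ PySem.Int.toStr loc, false))) := by
  induction xs generalizing k with
  | nil =>
    cases k with
    | zero => rw [Nat.cast_zero, rule3_zero]; rfl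
    | succ k =>
      rw [rule3_gt [] _ loc (by simp)]
      rfl
  | cons x rest ih =>
    cases k with
    | zero => rw [Nat.cast_zero, rule3_zero]; rfl
    | succ k =>
      have : ((k + 1 : Nat) : Int) = (k : Int) + 1 := by push_cast; ring
      rw [this, rule3_succ, ih k, ← this, ih (k + 1), combsAux]
      simp [List.map_map, Function.comp]

-- ===== VERDICT (by name: the statement is the Claim_ definition above) =====
theorem rule3_spec : Claim_equal_rule3 := by
  intro name_list n location _
  unfold Spec_rule3 rule3_alt
  by_cases hn : n < 0
  · rw [if_pos hn, rule3_neg name_list.length name_list n location le_rfl hn]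
  · rw [if_neg hn]
    have : n = ((n.toNat : Nat) : Int) := by omega
    rw [this, rule3_eq_combs]
    have h2 : ((n.toNat : Int)).toNat = n.toNat := by omega
    rw [h2]
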